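-- pv_equiv track=rewrite | github.com/rjhelms/AoC2021 | 9b.py | find_minima_iterate
-- ===== SOURCE A (Python) =====
-- def find_minima_iterate(grid) -> tuple[int, list]:
--     new_grid = []
--     for y in range(len(grid)):
--         new_grid.append([9 for _ in range(len(grid[0]))])
--
--     changes = 0
--     for y in range(len(grid)):
--         for x in range(len(grid[0])):
--             if (grid[y][x] < 9) and (
--                 ((y > 0) and (grid[y - 1][x] < grid[y][x]))
--                 or (y < (len(grid) - 1) and (grid[y + 1][x] < grid[y][x]))
--                 or (x > 0 and (grid[y][x - 1] < grid[y][x]))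
--                 or (x < (len(grid[0])) - 1 and (grid[y][x + 1] < grid[y][x]))
--             ):
--                 new_grid[y][x] = 9
--                 changes += 1
--             else:
--                 new_grid[y][x] = grid[y][x]
--
--     return changes, new_grid
-- ===== SOURCE B (Python) =====
-- def find_minima_iterate(grid) -> tuple[int, list]:
--     h = len(grid)
--     if h == 0:
--         return 0, []
--     w = len(grid[0])
--     # edge-wise passes: flag the strictly larger cell of each adjacent pair
--     non_min = [[False] * w for _ in range(h)]
--     for y in range(h):
--         row = grid[y]
--         for x in range(w - 1):
--             if row[x] < row[x + 1]:
--                 non_min[y][x + 1] = True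
--             elif row[x + 1] < row[x]:
--                 non_min[y][x] = True
--     for y in range(h - 1):
--         for x in range(w):
--             if grid[y][x] < grid[y + 1][x]:
--                 non_min[y + 1][x] = True
--             elif grid[y + 1][x] < grid[y][x]:
--                 non_min[y][x] = True
--     changes = 0
--     new_grid = []
--     for y in range(h):
--         new_row = []
--         for x in range(w):
--             if grid[y][x] < 9 and non_min[y][x]:
--                 new_row.append(9)
--                 changes += 1
--             else:
--                 new_row.append(grid[y][x])
--         new_grid.append(new_row)
--     return changes, new_grid
-- ===== Notes on version B (the rewrite author's own statement) =====
-- stated objective: alternative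
-- what changed: Replaces A's per-cell four-neighbour test with edge-wise passes: one horizontal and one vertical sweep flag the strictly larger cell of each adjacent pair into a boolean non_min mask, and a final pass rewrites flagged cells < 9 to 9 while counting changes.
import Mathlib
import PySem

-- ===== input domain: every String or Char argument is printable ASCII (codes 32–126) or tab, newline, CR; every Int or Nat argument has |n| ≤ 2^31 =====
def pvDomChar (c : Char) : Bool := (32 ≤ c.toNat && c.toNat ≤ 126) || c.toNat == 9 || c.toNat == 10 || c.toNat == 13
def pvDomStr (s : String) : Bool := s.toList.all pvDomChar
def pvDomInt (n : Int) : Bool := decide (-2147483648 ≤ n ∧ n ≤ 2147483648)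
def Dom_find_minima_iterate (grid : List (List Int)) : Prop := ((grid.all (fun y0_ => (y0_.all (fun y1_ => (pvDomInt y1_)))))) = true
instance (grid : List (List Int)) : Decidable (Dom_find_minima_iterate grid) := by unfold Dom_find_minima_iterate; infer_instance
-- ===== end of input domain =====

-- B replaces A's per-cell four-neighbour test by edge-wise passes that flag the strictly
-- larger cell of each adjacent pair into a boolean mask (objective: alternative decomposition).

-- shared helper: Python's `m[y][x] = v` on a list of lists (in range on every input Pre_ admits)
def pvSet2 {α : Type} (m : List (List α)) (y x : Nat) (v : α) : List (List α) :=
  m.set y ((m.getD y []).set x v)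

-- ===== PORT A =====
-- grid[y][x], totalized with defaults (in range wherever A reads, on every input Pre_ admits)
def pvA_cell (grid : List (List Int)) (y x : Nat) : Int := (grid.getD y []).getD x 0

-- A's if-condition, guards and disjuncts in A's order
def pvA_cond (grid : List (List Int)) (y x : Nat) : Bool :=
  decide (pvA_cell grid y x < 9) &&
    ((decide (0 < y) && decide (pvA_cell grid (y - 1) x < pvA_cell grid y x)) ||
     (decide (y + 1 < grid.length) && decide (pvA_cell grid (y + 1) x < pvA_cell grid y x)) ||
     (decide (0 < x) && decide (pvA_cell grid y (x - 1) < pvA_cell grid y x)) ||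
     (decide (x + 1 < (grid.getD 0 []).length) && decide (pvA_cell grid y (x + 1) < pvA_cell grid y x)))

-- new_grid = []; for y in range(len(grid)): new_grid.append([9 for _ in range(len(grid[0]))])
def pvA_initGrid (w : Nat) : Nat → List (List Int)
  | 0 => []
  | n + 1 => pvA_initGrid w n ++ [List.replicate w 9]

-- inner x-loop over the state (changes, new_grid)
def pvA_inner (grid : List (List Int)) (y : Nat) : Nat → Int × List (List Int) → Int × List (List Int)
  | 0, st => st
  | x + 1, st =>
    let st' := pvA_inner grid y x st
    if pvA_cond grid y x then (st'.1 + 1, pvSet2 st'.2 y x 9)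
    else (st'.1, pvSet2 st'.2 y x (pvA_cell grid y x))

def pvA_outer (grid : List (List Int)) (w : Nat) : Nat → Int × List (List Int) → Int × List (List Int)
  | 0, st => st
  | y + 1, st => pvA_inner grid y w (pvA_outer grid w y st)

def find_minima_iterate (grid : List (List Int)) : Int × List (List Int) :=
  let w := (grid.getD 0 []).length
  pvA_outer grid w grid.length (0, pvA_initGrid w grid.length)

-- ===== PORT B =====
def pvB_cell (grid : List (List Int)) (y x : Nat) : Int := (grid.getD y []).getD x 0

-- non_min[y][x]
def pvB_mget (m : List (List Bool)) (y x : Nat) : Bool := (m.getD y []).getD x false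

-- non_min = [[False]*w for _ in range(h)]
def pvB_mask0 (w : Nat) : Nat → List (List Bool)
  | 0 => []
  | n + 1 => pvB_mask0 w n ++ [List.replicate w false]

-- horizontal pass, one row: for x in range(w-1) flag the strictly larger of row[x], row[x+1]
def pvB_hInner (row : List Int) (y : Nat) : Nat → List (List Bool) → List (List Bool)
  | 0, m => m
  | x + 1, m =>
    let m' := pvB_hInner row y x m
    if row.getD x 0 < row.getD (x + 1) 0 then pvSet2 m' y (x + 1) true
    else if row.getD (x + 1) 0 < row.getD x 0 then pvSet2 m' y x true
    else m'

def pvB_hOuter (grid : List (List Int)) (w : Nat) : Nat → List (List Bool) → List (List Bool)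
  | 0, m => m
  | y + 1, m => pvB_hInner (grid.getD y []) y (w - 1) (pvB_hOuter grid w y m)

-- vertical pass, one row pair (y, y+1): for x in range(w) flag the strictly larger
def pvB_vInner (grid : List (List Int)) (y : Nat) : Nat → List (List Bool) → List (List Bool)
  | 0, m => m
  | x + 1, m =>
    let m' := pvB_vInner grid y x m
    if pvB_cell grid y x < pvB_cell grid (y + 1) x then pvSet2 m' (y + 1) x true
    else if pvB_cell grid (y + 1) x < pvB_cell grid y x then pvSet2 m' y x true
    else m'

def pvB_vOuter (grid : List (List Int)) (w : Nat) : Nat → List (List Bool) → List (List Bool)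
  | 0, m => m
  | y + 1, m => pvB_vInner grid y w (pvB_vOuter grid w y m)

-- output row y: append 9 (counting the change) where value < 9 and flagged, else the value
def pvB_buildRow (grid : List (List Int)) (mask : List (List Bool)) (y : Nat) :
    Nat → Int × List Int → Int × List Int
  | 0, st => st
  | x + 1, st =>
    let st' := pvB_buildRow grid mask y x st
    if decide (pvB_cell grid y x < 9) && pvB_mget mask y x then (st'.1 + 1, st'.2 ++ [9])
    else (st'.1, st'.2 ++ [pvB_cell grid y x])

def pvB_build (grid : List (List Int)) (mask : List (List Bool)) (w : Nat) :
    Nat → Int × List (List Int) → Int × List (List Int)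
  | 0, st => st
  | y + 1, st =>
    let st' := pvB_build grid mask w y st
    let p := pvB_buildRow grid mask y w (st'.1, [])
    (p.1, st'.2 ++ [p.2])

def find_minima_iterate_alt (grid : List (List Int)) : Int × List (List Int) :=
  if grid.length = 0 then (0, [])
  else
    let h := grid.length
    let w := (grid.getD 0 []).length
    let m1 := pvB_hOuter grid w h (pvB_mask0 w h)
    let m2 := pvB_vOuter grid w (h - 1) m1
    pvB_build grid m2 w h (0, [])

-- ===== PRECONDITION & SPEC =====
-- Pre_ excludes exactly the ragged grids on which Python A raises IndexError
-- (some row shorter than the first row); A returns normally on every other input.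
def Pre_find_minima_iterate (grid : List (List Int)) : Prop :=
  ∀ row ∈ grid, (grid.headD []).length ≤ row.length

instance (grid : List (List Int)) : Decidable (Pre_find_minima_iterate grid) := by
  unfold Pre_find_minima_iterate; infer_instance

def pvWitness_find_minima_iterate : List (List Int) := [[1, 2], [3, 0]]

def Spec_find_minima_iterate (grid : List (List Int)) (out : Int × List (List Int)) : Prop :=
  out = find_minima_iterate_alt grid

instance (grid : List (List Int)) (out : Int × List (List Int)) :
    Decidable (Spec_find_minima_iterate grid out) := by
  unfold Spec_find_minima_iterate; infer_instance

-- ===== CLAIM (what is proved, stated in full; the proofs are below) =====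
def Claim_equal_find_minima_iterate : Prop :=
  ∀ (grid : List (List Int)), Dom_find_minima_iterate grid →
    Pre_find_minima_iterate grid →
    Spec_find_minima_iterate grid (find_minima_iterate grid)

-- ===== LEMMAS AND PROOFS =====

-- shape of an h×w matrix
def pvShape {α : Type} (m : List (List α)) (h w : Nat) : Prop :=
  m.length = h ∧ ∀ r ∈ m, r.length = w

theorem pvShape_row {α : Type} {m : List (List α)} {h w y : Nat}
    (hs : pvShape m h w) (hy : y < h) : (m.getD y []).length = w := by
  obtain ⟨hl, hr⟩ := hs
  have hy' : y < m.length := by omega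
  rw [List.getD_eq_getElem m [] hy']
  exact hr _ (List.getElem_mem hy')

theorem pvShape_pvSet2 {α : Type} {m : List (List α)} {h w : Nat} (y x : Nat) (v : α)
    (hs : pvShape m h w) (hy : y < h) : pvShape (pvSet2 m y x v) h w := by
  obtain ⟨hl, hr⟩ := hs
  refine ⟨by simp [pvSet2, hl], fun r hrm => ?_⟩
  rcases List.mem_or_eq_of_mem_set hrm with hmem | rfl
  · exact hr _ hmem
  · rw [List.length_set]; exact pvShape_row ⟨hl, hr⟩ hy

theorem set_getD_self {α : Type} (l : List (List α)) (i : Nat) :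
    l.set i (l.getD i []) = l := by
  by_cases h : i < l.length
  · rw [List.getD_eq_getElem l [] h]; exact List.set_getElem_self h
  · exact List.set_eq_of_length_le (Nat.le_of_not_lt h)

theorem pvSet2_set {α : Type} (m : List (List α)) (R : List α) (y x : Nat) (v : α) :
    pvSet2 (m.set y R) y x v = m.set y (R.set x v) := by
  by_cases hy : y < m.length
  · simp [pvSet2, List.getD_eq_getElem?_getD, hy, List.set_set]
  · simp [pvSet2, List.set_eq_of_length_le (Nat.le_of_not_lt hy)]

theorem getD_set_true (r : List Bool) (x j : Nat) :
    ((r.set x true).getD j false) = (r.getD j false || (decide (x = j) && decide (x < r.length))) := by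
  rw [List.getD_eq_getElem?_getD, List.getD_eq_getElem?_getD, List.getElem?_set]
  rcases eq_or_ne x j with rfl | h
  · by_cases h2 : x < r.length
    · simp [h2]
    · simp [h2, List.getElem?_eq_none (Nat.le_of_not_lt h2)]
  · simp [h]

theorem getD_pvSet2 {α : Type} (m : List (List α)) (y x i : Nat) (v : α) :
    (pvSet2 m y x v).getD i [] =
      if y = i ∧ y < m.length then (m.getD y []).set x v else m.getD i [] := by
  rw [pvSet2, List.getD_eq_getElem?_getD, List.getElem?_set]
  rcases eq_or_ne y i with rfl | h
  · by_cases h2 : y < m.length <;> simp [h2, List.getD_eq_getElem?_getD]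
  · simp [h, List.getD_eq_getElem?_getD]

theorem pvB_mget_pvSet2 (m : List (List Bool)) (y x i j : Nat) :
    pvB_mget (pvSet2 m y x true) i j =
      (pvB_mget m i j ||
        (decide (y = i) && decide (x = j) && decide (y < m.length) &&
          decide (x < (m.getD y []).length))) := by
  rw [pvB_mget, getD_pvSet2]
  split_ifs with h
  · obtain ⟨rfl, h2⟩ := h
    rw [getD_set_true, pvB_mget]
    simp [h2, Bool.and_comm]
  · rw [pvB_mget]
    have h' : ¬(y = i) ∨ ¬(y < m.length) := by tauto
    rcases h' with h' | h' <;> simp [h']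

-- generic counters used to characterize both ports
def pvCntR (p : Nat → Bool) : Nat → Int
  | 0 => 0
  | n + 1 => pvCntR p n + (if p n then 1 else 0)

def pvCntA (p : Nat → Nat → Bool) (w : Nat) : Nat → Int
  | 0 => 0
  | n + 1 => pvCntA p w n + pvCntR (p n) w

theorem pvCntR_congr (p q : Nat → Bool) (n : Nat) (h : ∀ x < n, p x = q x) :
    pvCntR p n = pvCntR q n := by
  induction n with
  | zero => rfl
  | succ n ih =>
    simp only [pvCntR, ih (fun x hx => h x (Nat.lt_succ_of_lt hx)), h n (Nat.lt_succ_self n)]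

theorem pvCntA_congr (p q : Nat → Nat → Bool) (w n : Nat)
    (h : ∀ y < n, ∀ x < w, p y x = q y x) : pvCntA p w n = pvCntA q w n := by
  induction n with
  | zero => rfl
  | succ n ih =>
    simp only [pvCntA, ih (fun y hy => h y (Nat.lt_succ_of_lt hy)),
      pvCntR_congr _ _ w (h n (Nat.lt_succ_self n))]

-- ---- characterization of port A ----
def pvOut (grid : List (List Int)) (y x : Nat) : Int :=
  if pvA_cond grid y x then 9 else pvA_cell grid y x

def pvRowSet (grid : List (List Int)) (y : Nat) (r : List Int) : Nat → List Int
  | 0 => r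
  | x + 1 => (pvRowSet grid y r x).set x (pvOut grid y x)

theorem pvA_inner_eq (grid : List (List Int)) (y : Nat) (n : Nat) (c : Int)
    (ng : List (List Int)) :
    pvA_inner grid y n (c, ng) =
      (c + pvCntR (pvA_cond grid y) n, ng.set y (pvRowSet grid y (ng.getD y []) n)) := by
  induction n with
  | zero => simp only [pvA_inner, pvCntR, pvRowSet, add_zero, set_getD_self]
  | succ n ih =>
    rw [pvA_inner, ih]
    by_cases hc : pvA_cond grid y n <;>
      simp [hc, pvCntR, pvRowSet, pvSet2_set, pvOut, add_assoc]

def pvGridSet (grid : List (List Int)) (ng : List (List Int)) (w : Nat) : Nat → List (List Int)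
  | 0 => ng
  | y + 1 =>
    (pvGridSet grid ng w y).set y
      (pvRowSet grid y ((pvGridSet grid ng w y).getD y []) w)

theorem pvA_outer_eq (grid : List (List Int)) (w n : Nat) (c : Int)
    (ng : List (List Int)) :
    pvA_outer grid w n (c, ng) =
      (c + pvCntA (pvA_cond grid) w n, pvGridSet grid ng w n) := by
  induction n with
  | zero => simp [pvA_outer, pvCntA, pvGridSet]
  | succ n ih =>
    rw [pvA_outer, ih, pvA_inner_eq]
    simp [pvCntA, pvGridSet, add_assoc]

theorem pvRowSet_length (grid : List (List Int)) (y : Nat) (r : List Int) (n : Nat) :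
    (pvRowSet grid y r n).length = r.length := by
  induction n with
  | zero => rfl
  | succ n ih => simp [pvRowSet, ih]

theorem pvRowSet_getElem? (grid : List (List Int)) (y : Nat) (r : List Int) (n j : Nat) :
    (pvRowSet grid y r n)[j]? =
      if j < n ∧ j < r.length then some (pvOut grid y j) else r[j]? := by
  induction n with
  | zero => simp [pvRowSet]
  | succ n ih =>
    rw [pvRowSet, List.getElem?_set, pvRowSet_length, ih]
    rcases eq_or_ne n j with rfl | h1
    · by_cases h2 : n < r.length
      · simp [h2, Nat.lt_succ_iff]
      · simp [h2, List.getElem?_eq_none (Nat.le_of_not_lt h2)]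
    · have h3 : (j < n + 1 ∧ j < r.length) ↔ (j < n ∧ j < r.length) := by omega
      simp only [h3, if_neg h1]

theorem pvRowSet_replicate (grid : List (List Int)) (y w : Nat) :
    pvRowSet grid y (List.replicate w 9) w = (List.range w).map (pvOut grid y) := by
  apply List.ext_getElem?
  intro j
  rw [pvRowSet_getElem?]
  by_cases hj : j < w
  · simp [hj, List.getElem?_range hj]
  · simp [hj, List.getElem?_eq_none, List.getElem?_map]

theorem pvGridSet_length (grid ng : List (List Int)) (w n : Nat) :
    (pvGridSet grid ng w n).length = ng.length := by
  induction n with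
  | zero => rfl
  | succ n ih => simp [pvGridSet, ih]

theorem pvGridSet_getElem? (grid ng : List (List Int)) (w n i : Nat) :
    (pvGridSet grid ng w n)[i]? =
      if i < n ∧ i < ng.length then some (pvRowSet grid i (ng.getD i []) w) else ng[i]? := by
  induction n generalizing i with
  | zero => simp [pvGridSet]
  | succ n ih =>
    have hrow : (pvGridSet grid ng w n).getD n [] = ng.getD n [] := by
      rw [List.getD_eq_getElem?_getD, ih n, List.getD_eq_getElem?_getD]
      simp
    rw [pvGridSet, List.getElem?_set, pvGridSet_length, ih i, hrow]
    rcases eq_or_ne n i with rfl | h1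
    · by_cases h2 : n < ng.length
      · simp [h2, Nat.lt_succ_iff]
      · simp [h2, List.getElem?_eq_none (Nat.le_of_not_lt h2)]
    · have h3 : (i < n + 1 ∧ i < ng.length) ↔ (i < n ∧ i < ng.length) := by omega
      simp only [h3, if_neg h1]

theorem pvA_initGrid_eq (w n : Nat) :
    pvA_initGrid w n = List.replicate n (List.replicate w 9) := by
  induction n with
  | zero => rfl
  | succ n ih => rw [pvA_initGrid, ih, List.replicate_succ']

theorem pvA_eq (grid : List (List Int)) :
    find_minima_iterate grid =
      (pvCntA (pvA_cond grid) (grid.getD 0 []).length grid.length,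
        (List.range grid.length).map (fun y =>
          (List.range (grid.getD 0 []).length).map (pvOut grid y))) := by
  show pvA_outer grid _ grid.length (0, pvA_initGrid _ grid.length) = _
  rw [pvA_outer_eq, zero_add]
  refine congrArg _ ?_
  apply List.ext_getElem?
  intro i
  rw [pvGridSet_getElem?, pvA_initGrid_eq]
  by_cases hi : i < grid.length
  · simp [hi, pvRowSet_replicate, List.getElem?_range hi]
  · simp [hi, List.getElem?_eq_none, List.getElem?_map]

-- ---- characterization of port B's mask ----
theorem pvB_mask0_eq (w n : Nat) :
    pvB_mask0 w n = List.replicate n (List.replicate w false) := by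
  induction n with
  | zero => rfl
  | succ n ih => rw [pvB_mask0, ih, List.replicate_succ']

-- flags contributed by the partial horizontal pass over pairs (x, x+1), x < n, of row y
def pvHpart (row : List Int) (n j : Nat) : Bool :=
  (decide (1 ≤ j) && decide (j ≤ n) && decide (row.getD (j - 1) 0 < row.getD j 0)) ||
  (decide (j < n) && decide (row.getD (j + 1) 0 < row.getD j 0))

theorem pvB_hInner_shape (row : List Int) (y : Nat) (m : List (List Bool)) (h w : Nat)
    (hs : pvShape m h w) (hy : y < h) : ∀ n, pvShape (pvB_hInner row y n m) h w := by
  intro n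
  induction n with
  | zero => exact hs
  | succ n ih =>
    rw [pvB_hInner]
    split_ifs
    · exact pvShape_pvSet2 _ _ _ ih hy
    · exact pvShape_pvSet2 _ _ _ ih hy
    · exact ih

theorem pvHpart_succ (row : List Int) (n j : Nat) :
    pvHpart row (n + 1) j =
      (pvHpart row n j ||
        (decide (n + 1 = j) && decide (row.getD n 0 < row.getD (n + 1) 0)) ||
        (decide (n = j) && decide (row.getD (n + 1) 0 < row.getD n 0))) := by
  rw [Bool.eq_iff_iff]
  simp only [pvHpart, Bool.or_eq_true, Bool.and_eq_true, decide_eq_true_eq]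
  constructor
  · rintro (⟨⟨h1, h2⟩, h3⟩ | ⟨h1, h2⟩)
    · rcases Nat.lt_or_ge j (n + 1) with hlt | hge
      · exact Or.inl (Or.inl (Or.inl ⟨⟨h1, by omega⟩, h3⟩))
      · have hj : j = n + 1 := by omega
        refine Or.inl (Or.inr ⟨by omega, ?_⟩)
        rw [hj, Nat.add_sub_cancel] at h3
        exact h3
    · rcases Nat.lt_or_ge j n with hlt | hge
      · exact Or.inl (Or.inl (Or.inr ⟨hlt, h2⟩))
      · have hj : j = n := by omega
        refine Or.inr ⟨by omega, ?_⟩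
        rw [hj] at h2
        exact h2
  · rintro (((⟨⟨h1, h2⟩, h3⟩ | ⟨h1, h2⟩) | ⟨h1, h2⟩) | ⟨h1, h2⟩)
    · exact Or.inl ⟨⟨h1, by omega⟩, h3⟩
    · exact Or.inr ⟨by omega, h2⟩
    · refine Or.inl ⟨⟨by omega, by omega⟩, ?_⟩
      rw [← h1, Nat.add_sub_cancel]
      exact h2
    · refine Or.inr ⟨by omega, ?_⟩
      rw [← h1]
      exact h2

theorem pvB_hInner_mget (row : List Int) (y : Nat) (m : List (List Bool)) (h w : Nat)
    (hs : pvShape m h w) (hy : y < h) :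
    ∀ n, n ≤ w - 1 → ∀ i j, j < w →
      pvB_mget (pvB_hInner row y n m) i j =
        (pvB_mget m i j || (decide (y = i) && pvHpart row n j)) := by
  intro n
  induction n with
  | zero =>
    intro _ i j _
    have h0 : pvHpart row 0 j = false := by
      simp only [pvHpart]
      have h1 : ¬(j < 0) := by omega
      rcases Nat.eq_zero_or_pos j with rfl | hj
      · simp
      · have h2 : ¬(j ≤ 0) := by omega
        simp [h1, h2]
    simp [pvB_hInner, h0]
  | succ n ih =>
    intro hn i j hj
    have hn' : n ≤ w - 1 := by omega
    have hsh := pvB_hInner_shape row y m h w hs hy n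
    have hlen : (pvB_hInner row y n m).length = h := hsh.1
    have hrw : ((pvB_hInner row y n m).getD y []).length = w := pvShape_row hsh hy
    have hw1 : n + 1 < w := by omega
    rw [pvB_hInner]
    split_ifs with c1 c2
    · rw [pvB_mget_pvSet2, ih hn' i j hj, hlen, hrw]
      have hps : pvHpart row (n + 1) j = (pvHpart row n j || decide (n + 1 = j)) := by
        rw [pvHpart_succ, decide_eq_true c1, decide_eq_false (lt_asymm c1)]
        simp
      rcases eq_or_ne y i with rfl | hyi
      · simp [hy, hw1, hps, Bool.or_assoc]
      · simp [hyi]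
    · rw [pvB_mget_pvSet2, ih hn' i j hj, hlen, hrw]
      have hnw : n < w := by omega
      have hps : pvHpart row (n + 1) j = (pvHpart row n j || decide (n = j)) := by
        rw [pvHpart_succ, decide_eq_false c1, decide_eq_true c2]
        simp
      rcases eq_or_ne y i with rfl | hyi
      · simp [hy, hnw, hps, Bool.or_assoc]
      · simp [hyi]
    · rw [ih hn' i j hj]
      have hps : pvHpart row (n + 1) j = pvHpart row n j := by
        rw [pvHpart_succ, decide_eq_false c1, decide_eq_false c2]
        simp
      rw [hps]

theorem pvB_hOuter_shape (grid : List (List Int)) (w : Nat) (m : List (List Bool)) (h : Nat)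
    (hs : pvShape m h w) : ∀ n, n ≤ h → pvShape (pvB_hOuter grid w n m) h w := by
  intro n
  induction n with
  | zero => intro _; exact hs
  | succ n ih =>
    intro hn
    exact pvB_hInner_shape _ _ _ h w (ih (by omega)) (by omega) _

theorem pvB_hOuter_mget (grid : List (List Int)) (w : Nat) (m : List (List Bool)) (h : Nat)
    (hs : pvShape m h w) : ∀ n, n ≤ h → ∀ i j, i < h → j < w →
      pvB_mget (pvB_hOuter grid w n m) i j =
        (pvB_mget m i j || (decide (i < n) && pvHpart (grid.getD i []) (w - 1) j)) := by
  intro n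
  induction n with
  | zero =>
    intro _ i j _ _
    simp [pvB_hOuter]
  | succ n ih =>
    intro hn i j hi hj
    rw [pvB_hOuter,
      pvB_hInner_mget _ _ _ h w (pvB_hOuter_shape grid w m h hs n (by omega)) (by omega)
        (w - 1) (le_refl _) i j hj,
      ih (by omega) i j hi hj]
    rcases eq_or_ne n i with rfl | hni
    · have h1 : ¬(n < n) := by omega
      have h2 : n < n + 1 := by omega
      simp [h1, h2, Bool.or_assoc]
    · have e1 : (i < n + 1) = (i < n) := by simp; omega
      simp [hni, e1]

theorem pvB_vInner_shape (grid : List (List Int)) (y : Nat) (m : List (List Bool)) (h w : Nat)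
    (hs : pvShape m h w) (hy : y + 1 < h) : ∀ n, pvShape (pvB_vInner grid y n m) h w := by
  intro n
  induction n with
  | zero => exact hs
  | succ n ih =>
    rw [pvB_vInner]
    split_ifs
    · exact pvShape_pvSet2 _ _ _ ih hy
    · exact pvShape_pvSet2 _ _ _ ih (by omega)
    · exact ih

theorem pvB_vInner_mget (grid : List (List Int)) (y : Nat) (m : List (List Bool)) (h w : Nat)
    (hs : pvShape m h w) (hy : y + 1 < h) :
    ∀ n, n ≤ w → ∀ i j, j < w →
      pvB_mget (pvB_vInner grid y n m) i j =
        (pvB_mget m i j ||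
          (decide (i = y + 1) && decide (j < n) &&
            decide (pvB_cell grid y j < pvB_cell grid (y + 1) j)) ||
          (decide (i = y) && decide (j < n) &&
            decide (pvB_cell grid (y + 1) j < pvB_cell grid y j))) := by
  intro n
  induction n with
  | zero =>
    intro _ i j _
    simp [pvB_vInner]
  | succ n ih =>
    intro hn i j hj
    have hn' : n ≤ w := by omega
    have hnw : n < w := by omega
    have hsh := pvB_vInner_shape grid y m h w hs hy n
    have hlen : (pvB_vInner grid y n m).length = h := hsh.1
    have hr1 : ((pvB_vInner grid y n m).getD (y + 1) []).length = w := pvShape_row hsh hy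
    have hr0 : ((pvB_vInner grid y n m).getD y []).length = w := pvShape_row hsh (by omega)
    have t2 : n < n + 1 := by omega
    have t3 : ¬(n < n) := by omega
    rw [pvB_vInner]
    split_ifs with c1 c2
    · rw [pvB_mget_pvSet2, ih hn' i j hj, hlen, hr1]
      rcases eq_or_ne n j with hjn | hjn
      · rw [← hjn, decide_eq_true c1, decide_eq_false (lt_asymm c1)]
        have t1 : y + 1 < h := hy
        simp [t1, t2, t3, hnw, eq_comm, Bool.or_assoc, Bool.and_comm]
      · have e1 : decide (j ≤ n) = decide (j < n) := decide_eq_decide.mpr (by omega)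
        simp [e1, hjn]
    · rw [pvB_mget_pvSet2, ih hn' i j hj, hlen, hr0]
      rcases eq_or_ne n j with hjn | hjn
      · rw [← hjn, decide_eq_true c2, decide_eq_false c1]
        have t1 : y < h := by omega
        simp [t1, t2, t3, hnw, eq_comm, Bool.or_assoc, Bool.and_comm]
      · have e1 : decide (j ≤ n) = decide (j < n) := decide_eq_decide.mpr (by omega)
        simp [e1, hjn]
    · rw [ih hn' i j hj]
      rcases eq_or_ne n j with hjn | hjn
      · rw [← hjn, decide_eq_false c1, decide_eq_false c2]
        simp [t2, t3]
      · have e1 : decide (j ≤ n) = decide (j < n) := decide_eq_decide.mpr (by omega)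
        simp [e1, hjn]

theorem pvB_vOuter_shape (grid : List (List Int)) (w : Nat) (m : List (List Bool)) (h : Nat)
    (hs : pvShape m h w) : ∀ n, n + 1 ≤ h → pvShape (pvB_vOuter grid w n m) h w := by
  intro n
  induction n with
  | zero => intro _; exact hs
  | succ n ih =>
    intro hn
    exact pvB_vInner_shape _ _ _ h w (ih (by omega)) (by omega) _

theorem pvB_vOuter_mget (grid : List (List Int)) (w : Nat) (m : List (List Bool)) (h : Nat)
    (hs : pvShape m h w) : ∀ n, n + 1 ≤ h → ∀ i j, i < h → j < w →
      pvB_mget (pvB_vOuter grid w n m) i j =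
        (pvB_mget m i j ||
          (decide (1 ≤ i) && decide (i ≤ n) &&
            decide (pvB_cell grid (i - 1) j < pvB_cell grid i j)) ||
          (decide (i < n) && decide (pvB_cell grid (i + 1) j < pvB_cell grid i j))) := by
  intro n
  induction n with
  | zero =>
    intro _ i j _ _
    have h1 : ¬(i < 0) := by omega
    rcases Nat.eq_zero_or_pos i with rfl | hi
    · simp [pvB_vOuter]
    · have h2 : ¬(i ≤ 0) := by omega
      simp [pvB_vOuter, h1, h2]
  | succ n ih =>
    intro hn i j hi hj
    rw [pvB_vOuter,
      pvB_vInner_mget _ _ _ h w (pvB_vOuter_shape grid w m h hs n (by omega)) (by omega)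
        w (le_refl _) i j hj,
      ih (by omega) i j hi hj]
    rcases eq_or_ne i (n + 1) with rfl | hi1
    · have h1 : ¬(n + 1 ≤ n) := by omega
      have h2 : ¬(n + 1 < n) := by omega
      have h3 : ¬(n + 1 = n) := by omega
      have h4 : (1:Nat) ≤ n + 1 := by omega
      have h5 : ¬(n + 1 < n + 1) := by omega
      simp [h1, h2, h3, h4, h5, hj, Bool.or_assoc, Bool.and_comm]
    · rcases eq_or_ne i n with rfl | hi2
      · have h1 : i ≤ i + 1 := by omega
        have h2 : i < i + 1 := by omega
        have h3 : ¬(i < i) := by omega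
        have h4 : ¬(i = i + 1) := by omega
        by_cases h5 : 1 ≤ i <;>
          simp [h1, h2, h3, h4, h5, hj, Bool.or_assoc, Bool.and_comm]
      · have e1 : (i ≤ n + 1) = (i ≤ n) := by simp; omega
        have e2 : (i < n + 1) = (i < n) := by simp; omega
        simp [e1, e2, hi1, hi2]

-- the fully built mask reproduces A's per-cell condition
set_option maxHeartbeats 1000000 in
theorem pvB_mask_eq_cond (grid : List (List Int)) (hgrid : grid.length ≠ 0) (i j : Nat)
    (hi : i < grid.length) (hj : j < (grid.getD 0 []).length) :
    (decide (pvB_cell grid i j < 9) &&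
      pvB_mget (pvB_vOuter grid (grid.getD 0 []).length (grid.length - 1)
        (pvB_hOuter grid (grid.getD 0 []).length grid.length
          (pvB_mask0 (grid.getD 0 []).length grid.length))) i j) =
    pvA_cond grid i j := by
  set h := grid.length with hh
  set w := (grid.getD 0 []).length with hw
  have hmask0 : ∀ a b : Nat, pvB_mget (pvB_mask0 w h) a b = false := by
    intro a b
    simp [pvB_mget, pvB_mask0_eq, List.getD_eq_getElem?_getD, List.getElem?_replicate]
    split_ifs <;> simp
  have hs0 : pvShape (pvB_mask0 w h) h w := by
    constructor
    · simp [pvB_mask0_eq]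
    · intro r hr
      rw [pvB_mask0_eq] at hr
      rw [List.eq_of_mem_replicate hr]
      simp
  have hs1 : pvShape (pvB_hOuter grid w h (pvB_mask0 w h)) h w :=
    pvB_hOuter_shape grid w _ h hs0 h (le_refl _)
  have hh1 : h - 1 + 1 ≤ h := by omega
  rw [pvB_vOuter_mget grid w _ h hs1 (h - 1) hh1 i j hi hj,
    pvB_hOuter_mget grid w _ h hs0 h (le_refl _) i j hi hj, hmask0]
  simp only [pvHpart, pvA_cond, pvA_cell, pvB_cell]
  rw [← hh, ← hw]
  have g1 : decide (i < h) = true := decide_eq_true hi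
  have g2 : decide (j ≤ w - 1) = true := decide_eq_true (by omega)
  have g3 : decide (j < w - 1) = decide (j + 1 < w) := decide_eq_decide.mpr (by omega)
  have g4 : decide (i ≤ h - 1) = true := decide_eq_true (by omega)
  have g5 : decide (i < h - 1) = decide (i + 1 < h) := decide_eq_decide.mpr (by omega)
  have g6 : decide (0 < i) = decide (1 ≤ i) := decide_eq_decide.mpr (by omega)
  have g7 : decide (0 < j) = decide (1 ≤ j) := decide_eq_decide.mpr (by omega)
  rw [g1, g2, g3, g4, g5, g6, g7]
  rw [Bool.eq_iff_iff]
  simp only [Bool.and_eq_true, Bool.or_eq_true]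
  tauto

-- ---- characterization of port B's output loop ----
theorem pvB_buildRow_eq (grid : List (List Int)) (mask : List (List Bool)) (y n : Nat)
    (c : Int) (acc : List Int) :
    pvB_buildRow grid mask y n (c, acc) =
      (c + pvCntR (fun x => decide (pvB_cell grid y x < 9) && pvB_mget mask y x) n,
        acc ++ (List.range n).map (fun x =>
          if decide (pvB_cell grid y x < 9) && pvB_mget mask y x then 9
          else pvB_cell grid y x)) := by
  induction n with
  | zero => simp [pvB_buildRow, pvCntR]
  | succ n ih =>
    rw [pvB_buildRow, ih]
    cases hcc : (decide (pvB_cell grid y n < 9) && pvB_mget mask y n)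
    · have hx : ¬(pvB_cell grid y n < 9) ∨ pvB_mget mask y n = false := by
        cases hd : decide (pvB_cell grid y n < 9)
        · exact Or.inl (by simpa using hd)
        · cases hm : pvB_mget mask y n
          · exact Or.inr rfl
          · rw [hd, hm] at hcc; simp at hcc
      simp only [hcc]
      rcases hx with h | h <;> simp [pvCntR, List.range_succ, add_assoc, h]
    · have hdm : pvB_cell grid y n < 9 ∧ pvB_mget mask y n = true := by simpa using hcc
      obtain ⟨hp, hm⟩ := hdm
      simp only [hcc]
      simp [pvCntR, List.range_succ, add_assoc, hp, hm]

theorem pvB_build_eq (grid : List (List Int)) (mask : List (List Bool)) (w n : Nat)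
    (c : Int) (acc : List (List Int)) :
    pvB_build grid mask w n (c, acc) =
      (c + pvCntA (fun y x => decide (pvB_cell grid y x < 9) && pvB_mget mask y x) w n,
        acc ++ (List.range n).map (fun y => (List.range w).map (fun x =>
          if decide (pvB_cell grid y x < 9) && pvB_mget mask y x then 9
          else pvB_cell grid y x))) := by
  induction n with
  | zero => simp [pvB_build, pvCntA]
  | succ n ih =>
    rw [pvB_build, ih, pvB_buildRow_eq]
    simp [pvCntA, List.range_succ, add_assoc]

-- ===== VERDICT (by name: the statement is the Claim_ definition above) =====
theorem find_minima_iterate_spec : Claim_equal_find_minima_iterate := by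
  unfold Claim_equal_find_minima_iterate
  intro grid _ _
  unfold Spec_find_minima_iterate
  rw [pvA_eq]
  by_cases h0 : grid.length = 0
  · simp [find_minima_iterate_alt, h0, pvCntA]
  · simp only [find_minima_iterate_alt, if_neg h0]
    rw [pvB_build_eq, zero_add, List.nil_append]
    have hcond : ∀ y < grid.length, ∀ x < (grid.getD 0 []).length,
        (decide (pvB_cell grid y x < 9) &&
          pvB_mget (pvB_vOuter grid (grid.getD 0 []).length (grid.length - 1)
            (pvB_hOuter grid (grid.getD 0 []).length grid.length
              (pvB_mask0 (grid.getD 0 []).length grid.length))) y x) =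
          pvA_cond grid y x := fun y hy x hx => pvB_mask_eq_cond grid h0 y x hy hx
    refine Prod.ext ?_ ?_
    · exact pvCntA_congr _ _ _ _ (fun y hy x hx => (hcond y hy x hx).symm)
    · refine List.map_congr_left (fun y hy => ?_)
      rw [List.mem_range] at hy
      refine List.map_congr_left (fun x hx => ?_)
      rw [List.mem_range] at hx
      simp only [pvOut]
      rw [← hcond y hy x hx]
      rfl
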